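-- pv_equiv track=rewrite | github.com/ElectroWave182/Diviser_pour_regner_TP_5 | exo4.py | quadruplets
-- ===== SOURCE A (Python) =====
-- def quadruplets (debut, fin):
--
--     liste = []
--     for x0 in range (debut, fin):
--         for x1 in range (debut, fin):
--             for x2 in range (debut, fin):
--                 for x3 in range (debut, fin):
--
--                     if x0 != x1 and x2 != x3 and x0 + x2 < x1:
--                         liste.append ((x0, x1, x2, x3))
--
--     return liste
-- ===== SOURCE B (Python) =====
-- def quadruplets(debut, fin):
--     # Precompute once the list of (x2, x3) pairs with x3 != x2 (in inner-loop
--     # order).  For a fixed (x0, x1), the admissible x2 values are exactly the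
--     # first k = min(fin, x1 - x0) - debut values of the range, and each x2
--     # contributes n - 1 pairs, so the naive inner double loop is exactly the
--     # prefix pairs[:k * (n - 1)] -- a table lookup plus an arithmetic slice.
--     n = fin - debut
--     pairs = []
--     for c in range(debut, fin):
--         for d in range(debut, fin):
--             if d != c:
--                 pairs.append((c, d))
--     out = []
--     for x0 in range(debut, fin):
--         for x1 in range(debut, fin):
--             if x1 != x0:
--                 k = min(fin, x1 - x0) - debut
--                 if k > 0:
--                     for (c, d) in pairs[:k * (n - 1)]:
--                         out.append((x0, x1, c, d))
--     return out
-- ===== Notes on version B (the rewrite author's own statement) =====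
-- stated objective: alternative
-- what changed: B precomputes the (x2,x3) pair list once and replaces A's inner double loop with a per-tuple three-way test by an arithmetic prefix slice pairs[:k*(n-1)] of that table, where k counts the admissible x2 values for (x0,x1).
import Mathlib
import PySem

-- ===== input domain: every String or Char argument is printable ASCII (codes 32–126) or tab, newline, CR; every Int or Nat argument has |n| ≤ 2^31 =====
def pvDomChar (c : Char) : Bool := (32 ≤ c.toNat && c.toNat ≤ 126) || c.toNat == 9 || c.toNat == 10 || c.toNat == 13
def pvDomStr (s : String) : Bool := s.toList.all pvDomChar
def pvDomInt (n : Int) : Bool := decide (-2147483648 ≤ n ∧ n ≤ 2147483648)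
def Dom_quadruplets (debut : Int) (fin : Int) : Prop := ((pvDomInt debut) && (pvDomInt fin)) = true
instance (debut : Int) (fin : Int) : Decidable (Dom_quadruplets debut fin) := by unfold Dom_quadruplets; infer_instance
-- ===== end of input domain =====

-- B precomputes the (x2,x3) pair table once and replaces A's inner double loop by an
-- arithmetic prefix slice pairs[:k*(n-1)] per admissible (x0,x1) (objective: alternative).


-- ===== PORT A =====
def quadruplets (debut : Int) (fin : Int) : List (Int × Int × Int × Int) :=
  (PySem.List.pyRange debut fin 1).foldl (fun liste x0 =>
    (PySem.List.pyRange debut fin 1).foldl (fun liste x1 =>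
      (PySem.List.pyRange debut fin 1).foldl (fun liste x2 =>
        (PySem.List.pyRange debut fin 1).foldl (fun liste x3 =>
          if x0 ≠ x1 ∧ x2 ≠ x3 ∧ x0 + x2 < x1 then liste ++ [(x0, x1, x2, x3)] else liste)
          liste) liste) liste) []

-- ===== PORT B =====
def quadruplets_alt (debut : Int) (fin : Int) : List (Int × Int × Int × Int) :=
  let n := fin - debut
  let pairs := (PySem.List.pyRange debut fin 1).foldl (fun pairs c =>
      (PySem.List.pyRange debut fin 1).foldl (fun pairs d =>
        if d ≠ c then pairs ++ [(c, d)] else pairs) pairs) []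
  (PySem.List.pyRange debut fin 1).foldl (fun out x0 =>
    (PySem.List.pyRange debut fin 1).foldl (fun out x1 =>
      if x1 ≠ x0 then
        let k := min fin (x1 - x0) - debut
        if 0 < k then
          (PySem.List.slice pairs none (some (k * (n - 1)))).foldl
            (fun out cd => out ++ [(x0, x1, cd.1, cd.2)]) out
        else out
      else out) out) []

-- ===== PRECONDITION & SPEC =====
def Spec_quadruplets (debut : Int) (fin : Int) (out : List (Int × Int × Int × Int)) : Prop := out = quadruplets_alt debut fin
instance (debut : Int) (fin : Int) (out : List (Int × Int × Int × Int)) : Decidable (Spec_quadruplets debut fin out) := by unfold Spec_quadruplets; infer_instance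

-- ===== CLAIM (what is proved, stated in full; the proofs are below) =====
def Claim_equal_quadruplets : Prop := ∀ (debut : Int) (fin : Int), Dom_quadruplets debut fin → Spec_quadruplets debut fin (quadruplets debut fin)

-- ===== LEMMAS AND PROOFS =====

theorem pvFlatMap_congr {α β : Type} {l : List α} {f g : α → List β}
    (h : ∀ x ∈ l, f x = g x) : l.flatMap f = l.flatMap g := by
  simp only [List.flatMap_def]
  exact congrArg List.flatten (List.map_congr_left h)

-- the x3 loop: filtering x3 ≠ x2 out of [debut, fin) splits the range around x2
theorem pvFilter_ne_split (d f x2 : Int) (hd : d ≤ x2) (hf : x2 < f) :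
    (PySem.List.pyRange d f 1).filter (fun x3 => decide (x3 ≠ x2))
      = PySem.List.pyRange d x2 1 ++ PySem.List.pyRange (x2 + 1) f 1 := by
  have hL : (PySem.List.pyRange d x2 1).filter (fun x3 => decide (x3 ≠ x2))
      = PySem.List.pyRange d x2 1 := by
    apply List.filter_eq_self.mpr
    intro x hx; rw [PySem.List.mem_pyRange_one] at hx
    simp; omega
  have hR : (PySem.List.pyRange (x2 + 1) f 1).filter (fun x3 => decide (x3 ≠ x2))
      = PySem.List.pyRange (x2 + 1) f 1 := by
    apply List.filter_eq_self.mpr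
    intro x hx; rw [PySem.List.mem_pyRange_one] at hx
    simp; omega
  rw [PySem.List.pyRange_one_append d x2 f hd (by omega),
      PySem.List.pyRange_one_cons (by omega : x2 < f), List.filter_append,
      List.filter_cons_of_neg (by simp), hL, hR]

-- one row of the pair table: the x3's admissible for a given x2
def pvBlock (debut fin c : Int) : List (Int × Int) :=
  ((PySem.List.pyRange debut fin 1).filter (fun d => decide (d ≠ c))).map (fun d => (c, d))

theorem pvBlock_length (debut fin c : Int) (h1 : debut ≤ c) (h2 : c < fin) :
    (pvBlock debut fin c).length = (fin - debut - 1).toNat := by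
  unfold pvBlock
  rw [List.length_map, pvFilter_ne_split debut fin c h1 h2, List.length_append,
      PySem.List.length_pyRange_one, PySem.List.length_pyRange_one]
  omega

-- restricting a range by an upper-bound condition on the loop variable
theorem pvFlatMap_range_ite {β : Type} (a b c : Int) (h : Int → List β) :
    (PySem.List.pyRange a b 1).flatMap (fun x => if x < c then h x else [])
      = (PySem.List.pyRange a (min b c) 1).flatMap h := by
  by_cases hba : b ≤ a
  · rw [PySem.List.pyRange_one_eq_nil hba, PySem.List.pyRange_one_eq_nil (by omega : min b c ≤ a)]
    simp
  · by_cases hca : c ≤ a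
    · rw [PySem.List.pyRange_one_eq_nil (by omega : min b c ≤ a)]
      rw [pvFlatMap_congr (g := fun _ => ([] : List β))
        (by intro x hx; rw [PySem.List.mem_pyRange_one] at hx
            rw [if_neg (by omega)])]
      simp
    · have h1 : a ≤ min b c := by omega
      have h2 : min b c ≤ b := by omega
      rw [PySem.List.pyRange_one_append a (min b c) b h1 h2, List.flatMap_append]
      have hl : (PySem.List.pyRange a (min b c) 1).flatMap (fun x => if x < c then h x else [])
          = (PySem.List.pyRange a (min b c) 1).flatMap h := by
        apply pvFlatMap_congr; intro x hx
        rw [PySem.List.mem_pyRange_one] at hx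
        rw [if_pos (by omega)]
      have hr : (PySem.List.pyRange (min b c) b 1).flatMap (fun x => if x < c then h x else [])
          = [] := by
        rw [pvFlatMap_congr (g := fun _ => ([] : List β))
          (by intro x hx; rw [PySem.List.mem_pyRange_one] at hx
              rw [if_neg (by omega)])]
        simp
      rw [hl, hr, List.append_nil]

-- length of a flatMap whose blocks all have the same length
theorem pvFlatMap_length {l : List Int} {m : Nat} (debut fin : Int)
    (h : ∀ c ∈ l, (pvBlock debut fin c).length = m) :
    (l.flatMap (pvBlock debut fin)).length = l.length * m := by
  induction l with
  | nil => simp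
  | cons c t ih =>
    rw [List.flatMap_cons, List.length_append, h c (by simp),
        ih (fun x hx => h x (by simp [hx])), List.length_cons]
    ring

-- the prefix of the pair table used for a bound k: exactly the first k rows
theorem pvTake_pairs (debut fin k : Int) (hk : 0 < k) (hkn : debut + k ≤ fin) :
    ((PySem.List.pyRange debut fin 1).flatMap (pvBlock debut fin)).take
        (k * (fin - debut - 1)).toNat
      = (PySem.List.pyRange debut (debut + k) 1).flatMap (pvBlock debut fin) := by
  rw [PySem.List.pyRange_one_append debut (debut + k) fin (by omega) hkn, List.flatMap_append]
  have hlen : ((PySem.List.pyRange debut (debut + k) 1).flatMap (pvBlock debut fin)).length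
      = (k * (fin - debut - 1)).toNat := by
    rw [pvFlatMap_length debut fin
      (fun c hc => by
        rw [PySem.List.mem_pyRange_one] at hc
        exact pvBlock_length debut fin c hc.1 (by omega)),
      PySem.List.length_pyRange_one]
    have h1 : ((debut + k - debut).toNat : Int) = k := by omega
    have h2 : (((fin - debut - 1).toNat : Nat) : Int) = fin - debut - 1 := by omega
    have h3 : (((debut + k - debut).toNat * (fin - debut - 1).toNat : Nat) : Int)
        = k * (fin - debut - 1) := by push_cast [h1, h2]; ring
    omega
  rw [← hlen, List.take_left]

-- flatMap of singletons is a map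
theorem pvFlatMap_single {α β : Type} (l : List α) (f : α → β) :
    l.flatMap (fun x => [f x]) = l.map f := by
  induction l with
  | nil => rfl
  | cons a t ih => simp [ih]

-- pushing B's two guards out of the accumulator position
theorem pvPush_ite {β : Type} (p q : Prop) [Decidable p] [Decidable q]
    (out M : List β) :
    (if p then (if q then out ++ M else out) else out)
      = out ++ (if p then (if q then M else []) else []) := by
  split_ifs <;> simp

-- ===== VERDICT (by name: the statement is the Claim_ definition above) =====
theorem quadruplets_spec : Claim_equal_quadruplets := by
  intro debut fin _
  unfold Spec_quadruplets quadruplets quadruplets_alt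
  simp only [PySem.List.foldl_append_ite, PySem.List.foldl_append_eq_flatMap,
    pvPush_ite, List.nil_append]
  apply pvFlatMap_congr; intro x0 hx0
  apply pvFlatMap_congr; intro x1 hx1
  rw [PySem.List.mem_pyRange_one] at hx0 hx1
  by_cases hne : x1 = x0
  · rw [if_neg (fun h => h hne)]
    rw [pvFlatMap_congr (g := fun _ => ([] : List (Int × Int × Int × Int)))
      (by intro x2 _
          rw [List.filter_eq_nil_iff.mpr (by intro x3 _; simp [hne])]
          simp)]
    simp
  · rw [if_pos hne]
    -- A's inner double loop, as a flatMap over the admissible x2 range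
    have hA : (PySem.List.pyRange debut fin 1).flatMap
          (fun x2 => ((PySem.List.pyRange debut fin 1).filter
              (fun x3 => decide (x0 ≠ x1 ∧ x2 ≠ x3 ∧ x0 + x2 < x1))).map
              (fun x3 => (x0, x1, x2, x3)))
        = (PySem.List.pyRange debut (min fin (x1 - x0)) 1).flatMap
            (fun x2 => ((PySem.List.pyRange debut fin 1).filter
                (fun x3 => decide (x3 ≠ x2))).map (fun x3 => (x0, x1, x2, x3))) := by
      rw [pvFlatMap_congr
        (g := fun x2 => if x2 < x1 - x0 then
            ((PySem.List.pyRange debut fin 1).filter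
                (fun x3 => decide (x3 ≠ x2))).map (fun x3 => (x0, x1, x2, x3))
          else [])
        (by intro x2 hx2
            beta_reduce
            by_cases hc : x2 < x1 - x0
            · rw [if_pos hc]
              rw [List.filter_congr (q := fun x3 => decide (x3 ≠ x2))
                (by intro x3 _
                    simp only [decide_eq_decide]
                    constructor
                    · rintro ⟨_, h, _⟩; exact fun e => h e.symm
                    · intro h; exact ⟨fun e => hne e.symm, fun e => h e.symm, by omega⟩)]
            · rw [if_neg hc]
              rw [List.filter_eq_nil_iff.mpr (by intro x3 _; simp; intro _ _; omega)]
              simp)]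
      rw [pvFlatMap_range_ite]
    rw [hA]
    -- the pair table is the flatMap of the rows
    have hp : (fun (c : Int) => List.map (Prod.mk c)
          (List.filter (fun d => decide (d ≠ c)) (PySem.List.pyRange debut fin 1)))
        = pvBlock debut fin := by
      funext c; rfl
    rw [hp]
    by_cases hk : 0 < min fin (x1 - x0) - debut
    · rw [if_pos hk]
      have hdf : debut < fin := by omega
      have h1 : 0 ≤ (min fin (x1 - x0) - debut) * (fin - debut - 1) :=
        mul_nonneg (le_of_lt hk) (by omega)
      rw [PySem.List.slice_to _ h1,
          pvTake_pairs debut fin (min fin (x1 - x0) - debut) hk (by omega),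
          (by omega : debut + (min fin (x1 - x0) - debut) = min fin (x1 - x0)),
          List.flatMap_assoc]
      apply pvFlatMap_congr; intro c hc
      simp only [pvBlock, List.flatMap_map]
      exact (pvFlatMap_single _ _).symm
    · rw [if_neg hk]
      rw [PySem.List.pyRange_one_eq_nil (by omega : min fin (x1 - x0) ≤ debut)]
      simp
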